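-- pv_equiv track=rewrite | github.com/sergey-automation/ocr-rag-pipeline | scripts/make_chunks_512_from_cleaned.py | choose_parts
-- ===== SOURCE A (Python) =====
-- import math
--
-- def choose_parts(word_count: int, max_words: int, overlap_words: int) -> int:
--     # Выбираем минимальное количество частей,
--     # чтобы каждая часть с учётом overlap влезала в max_words.
--     if word_count <= max_words:
--         return 1
--
--     k = 2
--     while True:
--         max_core = math.ceil(word_count / k)
--         if max_core + overlap_words <= max_words:
--             return k
--         k += 1
-- ===== SOURCE B (Python) =====
-- def choose_parts(word_count: int, max_words: int, overlap_words: int) -> int: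
--     # Minimal parts so that each core chunk plus overlap fits into max_words,
--     # computed in closed form instead of scanning k = 2, 3, ...
--     if word_count <= max_words:
--         return 1
--     core = max_words - overlap_words
--     if core >= 1:
--         # smallest k >= 2 with ceil(word_count / k) <= core, i.e. word_count <= core * k
--         return max(2, -(-word_count // core))
--     # core <= 0: splitting further never helps; 2 parts is the only possible answer
--     return 2
-- ===== Notes on version B (the rewrite author's own statement) =====
-- stated objective: alternative
-- what changed: Replaces A's linear scan over candidate part counts k=2,3,... with the closed form max(2, ceil(word_count/(max_words-overlap_words))) computed by one integer ceiling division.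
import Mathlib
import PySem

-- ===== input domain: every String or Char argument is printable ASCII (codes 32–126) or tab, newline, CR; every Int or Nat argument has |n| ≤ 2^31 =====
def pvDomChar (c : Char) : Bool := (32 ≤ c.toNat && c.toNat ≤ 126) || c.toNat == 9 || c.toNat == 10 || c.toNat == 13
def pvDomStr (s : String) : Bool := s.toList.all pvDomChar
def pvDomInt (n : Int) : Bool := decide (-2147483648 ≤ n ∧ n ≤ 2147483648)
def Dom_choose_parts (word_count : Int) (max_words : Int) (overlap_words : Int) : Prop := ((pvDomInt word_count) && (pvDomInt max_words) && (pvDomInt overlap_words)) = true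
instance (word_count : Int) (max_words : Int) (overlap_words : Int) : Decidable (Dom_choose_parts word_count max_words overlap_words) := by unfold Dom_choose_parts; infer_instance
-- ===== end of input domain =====

-- B computes A's answer by one closed-form ceiling division instead of A's linear scan over k.

-- ===== PORT A =====
-- A's 'while True' loop, with fuel making it total; the fuel is never exhausted on Pre_.
-- math.ceil(word_count / k) is ported as exact integer ceiling -((-word_count) // k):
-- exact on Dom (|word_count| ≤ 2^31 < 2^53, so the float division A uses rounds to the true ceiling).
def choose_parts_loop (word_count : Int) (max_words : Int) (overlap_words : Int) (k : Int) : Nat → Int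
  | 0 => 0
  | f + 1 =>
    let max_core := -(PySem.Int.floordiv (-word_count) k)
    if max_core + overlap_words ≤ max_words then k
    else choose_parts_loop word_count max_words overlap_words (k + 1) f

def choose_parts (word_count : Int) (max_words : Int) (overlap_words : Int) : Int :=
  if word_count ≤ max_words then 1
  else choose_parts_loop word_count max_words overlap_words 2 (word_count.toNat + 2)

-- ===== PORT B =====
def choose_parts_alt (word_count : Int) (max_words : Int) (overlap_words : Int) : Int :=
  if word_count ≤ max_words then 1
  else
    let core := max_words - overlap_words
    if 1 ≤ core then max 2 (-(PySem.Int.floordiv (-word_count) core))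
    else 2

-- ===== PRECONDITION & SPEC =====
-- Pre_ excludes exactly the inputs on which A's while loop never terminates (no k ≥ 2 ever
-- satisfies ceil(word_count/k) + overlap_words ≤ max_words); A returns on every other input.
def Pre_choose_parts (word_count : Int) (max_words : Int) (overlap_words : Int) : Prop :=
  word_count ≤ max_words ∨ 1 ≤ max_words - overlap_words ∨ word_count ≤ 2 * (max_words - overlap_words)
instance (word_count : Int) (max_words : Int) (overlap_words : Int) : Decidable (Pre_choose_parts word_count max_words overlap_words) := by unfold Pre_choose_parts; infer_instance
def pvWitness_choose_parts : Int × Int × Int := (10, 4, 1)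

def Spec_choose_parts (word_count : Int) (max_words : Int) (overlap_words : Int) (out : Int) : Prop := out = choose_parts_alt word_count max_words overlap_words
instance (word_count : Int) (max_words : Int) (overlap_words : Int) (out : Int) : Decidable (Spec_choose_parts word_count max_words overlap_words out) := by unfold Spec_choose_parts; infer_instance

-- ===== CLAIM (what is proved, stated in full; the proofs are below) =====
def Claim_equal_choose_parts : Prop := ∀ (word_count : Int) (max_words : Int) (overlap_words : Int), Dom_choose_parts word_count max_words overlap_words → Pre_choose_parts word_count max_words overlap_words → Spec_choose_parts word_count max_words overlap_words (choose_parts word_count max_words overlap_words)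

-- ===== LEMMAS AND PROOFS =====

-- the loop guard, for k > 0, says exactly word_count ≤ (max_words - overlap_words) * k
lemma cond_iff (wc mw ow k : Int) (hk : 0 < k) :
    (-(PySem.Int.floordiv (-wc) k) + ow ≤ mw) ↔ wc ≤ (mw - ow) * k := by
  have h := PySem.Int.le_floordiv_iff_mul_le (a := -wc) (b := k) (q := -(mw - ow)) hk
  constructor
  · intro h1
    have : -(mw - ow) ≤ PySem.Int.floordiv (-wc) k := by omega
    have := h.mp this
    nlinarith
  · intro h1
    have : -(mw - ow) * k ≤ -wc := by nlinarith
    have := h.mpr this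
    omega

-- the loop returns the least k0 ≥ k satisfying the guard, given enough fuel
lemma loop_eq (wc mw ow : Int) (k0 : Int) :
    ∀ (f : Nat) (k : Int), 0 < k → k ≤ k0 → wc ≤ (mw - ow) * k0 →
    (∀ j : Int, k ≤ j → j < k0 → ¬ wc ≤ (mw - ow) * j) →
    k0 - k < (f : Int) →
    choose_parts_loop wc mw ow k f = k0 := by
  intro f
  induction f with
  | zero => intro k _ _ _ _ hf; omega
  | succ n ih =>
    intro k hk hkk0 hcond hmin hf
    simp only [choose_parts_loop]
    by_cases hc : -(PySem.Int.floordiv (-wc) k) + ow ≤ mw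
    · rw [if_pos hc]
      have hck : wc ≤ (mw - ow) * k := (cond_iff wc mw ow k hk).mp hc
      by_contra hne
      exact hmin k le_rfl (lt_of_le_of_ne hkk0 hne) hck
    · rw [if_neg hc]
      have hck : ¬ wc ≤ (mw - ow) * k := fun h => hc ((cond_iff wc mw ow k hk).mpr h)
      have hklt : k < k0 := by
        rcases lt_or_eq_of_le hkk0 with h | h
        · exact h
        · exact absurd (h ▸ hcond) hck
      exact ih (k + 1) (by omega) (by omega) hcond
        (fun j hj hj' => hmin j (by omega) hj') (by omega)

-- ===== VERDICT (by name: the statement is the Claim_ definition above) =====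
theorem choose_parts_spec : Claim_equal_choose_parts := by
  intro wc mw ow hdom hpre
  unfold Spec_choose_parts choose_parts choose_parts_alt
  by_cases h1 : wc ≤ mw
  · simp [h1]
  · rw [if_neg h1, if_neg h1]
    have hwc : mw < wc := by omega
    set m := mw - ow with hm
    by_cases hm1 : 1 ≤ m
    · simp only [if_pos hm1]
      set q := -(PySem.Int.floordiv (-wc) m) with hq
      have hqb : (q - 1) * m < wc ∧ wc ≤ q * m :=
        (PySem.Int.neg_floordiv_neg_eq_iff_of_pos (by omega : (0:Int) < m)).mp rfl
      have hub : wc ≤ 0 ∨ q ≤ wc := by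
        by_cases hw0 : wc ≤ 0
        · exact Or.inl hw0
        · right
          by_contra hqw
          push Not at hqw
          nlinarith [hqb.1]
      apply loop_eq wc mw ow (max 2 q) (wc.toNat + 2) 2 (by omega)
        (le_max_left 2 q)
      · rcases (by omega : q ≤ 2 ∨ 2 < q) with h | h
        · rw [max_eq_left h]; nlinarith [hqb.2]
        · rw [max_eq_right (le_of_lt h)]; nlinarith [hqb.2]
      · intro j hj hj'
        have hq2 : 2 < max 2 q := lt_of_le_of_lt hj hj'
        have hmax : max 2 q = q := by
          rcases max_cases 2 q with ⟨h, _⟩ | ⟨h, _⟩ <;> omega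
        rw [hmax] at hj'
        intro hcon
        nlinarith [hqb.1]
      · have hq1 : q ≤ 1 ∨ q ≤ wc := by
          rcases hub with h | h
          · left; nlinarith [hqb.1]
          · right; exact h
        rcases hq1 with h | h <;> omega
    · simp only [if_neg hm1]
      have h2m : wc ≤ 2 * m := by
        unfold Pre_choose_parts at hpre; omega
      apply loop_eq wc mw ow 2 (wc.toNat + 2) 2 (by omega) le_rfl (by linarith)
        (by intro j hj hj' _; omega) (by omega)
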